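-- pv_equiv track=rewrite | github.com/Ramsairohit/ai-cross-document-investigation | stage_3_parsing/speaker_detection.py | normalize_speaker_name
-- ===== SOURCE A (Python) =====
-- def normalize_speaker_name(speaker: str) -> str:
--     """
--     Normalize speaker name for consistency.
--
--     Expands common abbreviations and standardizes format.
--
--     Args:
--         speaker: Raw speaker name
--
--     Returns:
--         Normalized speaker name
--     """
--     if not speaker:
--         return speaker
--
--     # Already uppercase from detect_speaker
--     normalized = speaker.strip().upper()
--
--     # Normalize common abbreviations
--     abbreviation_map = {
--         "DET ": "DETECTIVE ",
--         "OFC ": "OFFICER ",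
--         "SGT ": "SERGEANT ",
--         "LT ": "LIEUTENANT ",
--         "CPT ": "CAPTAIN ",
--         "DR ": "DR. ",
--         "MR ": "MR. ",
--         "MRS ": "MRS. ",
--         "MS ": "MS. ",
--         "HON ": "HONORABLE ",
--     }
--
--     for abbrev, full in abbreviation_map.items():
--         if normalized.startswith(abbrev):
--             normalized = full + normalized[len(abbrev) :]
--             break
--
--     return normalized
-- ===== SOURCE B (Python) =====
-- _BY3 = {"LT ": "LIEUTENANT ", "DR ": "DR. ", "MR ": "MR. ", "MS ": "MS. "}
-- _BY4 = {"DET ": "DETECTIVE ", "OFC ": "OFFICER ", "SGT ": "SERGEANT ",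
--         "CPT ": "CAPTAIN ", "MRS ": "MRS. ", "HON ": "HONORABLE "}
--
--
-- def normalize_speaker_name(speaker: str) -> str:
--     if not speaker:
--         return speaker
--     n = speaker.strip().upper()
--     full = _BY3.get(n[:3])
--     if full is not None:
--         return full + n[3:]
--     full = _BY4.get(n[:4])
--     if full is not None:
--         return full + n[4:]
--     return n
-- ===== Notes on version B (the rewrite author's own statement) =====
-- stated objective: alternative
-- what changed: A linearly scans ten startswith tests with an early break; B instead takes the fixed-length 3- and 4-char leading slice of the normalized name and looks each up in a dict keyed by the bare prefix, so the scan over the abbreviation table disappears.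
import Mathlib
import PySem

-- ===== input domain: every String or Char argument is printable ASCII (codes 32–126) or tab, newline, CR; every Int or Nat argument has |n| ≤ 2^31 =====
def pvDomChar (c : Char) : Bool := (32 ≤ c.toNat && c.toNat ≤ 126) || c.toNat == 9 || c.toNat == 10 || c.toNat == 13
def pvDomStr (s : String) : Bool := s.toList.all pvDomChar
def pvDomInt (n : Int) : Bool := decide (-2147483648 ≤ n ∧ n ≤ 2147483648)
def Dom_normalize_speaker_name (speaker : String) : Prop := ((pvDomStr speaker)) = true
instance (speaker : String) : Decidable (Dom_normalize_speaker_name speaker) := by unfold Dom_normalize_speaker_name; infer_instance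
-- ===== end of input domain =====

-- B replaces A's linear scan of ten startswith tests by two dict lookups keyed by the
-- fixed-length (3- or 4-char) leading slice of the normalized name (objective: alternative).

-- ===== PORT A =====
def nsnAbbrevMap : List (String × String) :=
  [("DET ", "DETECTIVE "), ("OFC ", "OFFICER "), ("SGT ", "SERGEANT "),
   ("LT ", "LIEUTENANT "), ("CPT ", "CAPTAIN "), ("DR ", "DR. "),
   ("MR ", "MR. "), ("MRS ", "MRS. "), ("MS ", "MS. "), ("HON ", "HONORABLE ")]

-- the for-loop over abbreviation_map.items() with an early break at the first match
def nsnLoop : List (String × String) → String → String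
  | [], n => n
  | (ab, full) :: rest, n =>
    if PySem.Str.startswith n ab then
      full ++ PySem.Str.slice n (some (PySem.Str.len ab)) none
    else nsnLoop rest n

def normalize_speaker_name (speaker : String) : String :=
  if speaker == "" then speaker
  else nsnLoop nsnAbbrevMap (PySem.Str.upper (PySem.Str.strip speaker))

-- ===== PORT B =====
def nsnBy3 : PySem.Dict String String :=
  PySem.Dict.ofList [("LT ", "LIEUTENANT "), ("DR ", "DR. "), ("MR ", "MR. "), ("MS ", "MS. ")]

def nsnBy4 : PySem.Dict String String :=
  PySem.Dict.ofList [("DET ", "DETECTIVE "), ("OFC ", "OFFICER "), ("SGT ", "SERGEANT "),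
                     ("CPT ", "CAPTAIN "), ("MRS ", "MRS. "), ("HON ", "HONORABLE ")]

def normalize_speaker_name_alt (speaker : String) : String :=
  if speaker == "" then speaker
  else
    let n := PySem.Str.upper (PySem.Str.strip speaker)
    match PySem.Dict.get? nsnBy3 (PySem.Str.slice n none (some 3)) with
    | some full => full ++ PySem.Str.slice n (some 3) none
    | none =>
      match PySem.Dict.get? nsnBy4 (PySem.Str.slice n none (some 4)) with
      | some full => full ++ PySem.Str.slice n (some 4) none
      | none => n

-- ===== PRECONDITION & SPEC =====
def Spec_normalize_speaker_name (speaker : String) (out : String) : Prop := out = normalize_speaker_name_alt speaker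
instance (speaker : String) (out : String) : Decidable (Spec_normalize_speaker_name speaker out) := by unfold Spec_normalize_speaker_name; infer_instance

-- ===== CLAIM (what is proved, stated in full; the proofs are below) =====
def Claim_equal_normalize_speaker_name : Prop := ∀ (speaker : String), Dom_normalize_speaker_name speaker → Spec_normalize_speaker_name speaker (normalize_speaker_name speaker)

-- ===== LEMMAS AND PROOFS =====

theorem nsnBy3_eq : nsnBy3 = PySem.Dict.mk
    [("LT ", "LIEUTENANT "), ("DR ", "DR. "), ("MR ", "MR. "), ("MS ", "MS. ")] := by decide

theorem nsnBy4_eq : nsnBy4 = PySem.Dict.mk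
    [("DET ", "DETECTIVE "), ("OFC ", "OFFICER "), ("SGT ", "SERGEANT "),
     ("CPT ", "CAPTAIN "), ("MRS ", "MRS. "), ("HON ", "HONORABLE ")] := by decide

theorem nsn_get?_mk_nil (x : String) :
    (PySem.Dict.mk ([] : List (String × String))).get? x = none := rfl

-- A's startswith test, phrased as an equation on the leading slice
theorem nsn_condA (n p : String) :
    (PySem.Str.startswith n p = true) ↔ n.toList.take p.toList.length = p.toList := by
  rw [PySem.Str.startswith_eq, PySem.Chars.startswith_iff, List.prefix_iff_eq_take, eq_comm]

-- B's dict-key comparison, phrased the same way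
theorem nsn_condB (n k : String) (j : Nat) :
    ((k == PySem.Str.slice n none (some (j : Int))) = true) ↔ n.toList.take j = k.toList := by
  rw [beq_iff_eq, ← String.toList_inj, eq_comm]
  simp [pysem]

-- a take-3 key and a take-4 key whose first three chars disagree cannot both match
theorem nsn_clash (cs l3 l4 : List Char) (h3 : List.take 3 cs = l3)
    (h4 : List.take 4 cs = l4) (hne : ¬ List.take 3 l4 = l3) : False := by
  apply hne
  rw [← h4, List.take_take, ← h3]
  norm_num

set_option maxHeartbeats 2000000 in
theorem nsn_core (n : String) :
    nsnLoop nsnAbbrevMap n =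
      (match PySem.Dict.get? nsnBy3 (PySem.Str.slice n none (some 3)) with
       | some full => full ++ PySem.Str.slice n (some 3) none
       | none =>
         match PySem.Dict.get? nsnBy4 (PySem.Str.slice n none (some 4)) with
         | some full => full ++ PySem.Str.slice n (some 4) none
         | none => n) := by
  have h3 : (3 : Int) = ((3 : Nat) : Int) := by norm_num
  have h4 : (4 : Int) = ((4 : Nat) : Int) := by norm_num
  have hl0 : "DET ".toList.length = 4 := rfl
  have hL0 : PySem.Str.len "DET " = ((4 : Nat) : Int) := rfl
  have hl1 : "OFC ".toList.length = 4 := rfl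
  have hL1 : PySem.Str.len "OFC " = ((4 : Nat) : Int) := rfl
  have hl2 : "SGT ".toList.length = 4 := rfl
  have hL2 : PySem.Str.len "SGT " = ((4 : Nat) : Int) := rfl
  have hl3 : "LT ".toList.length = 3 := rfl
  have hL3 : PySem.Str.len "LT " = ((3 : Nat) : Int) := rfl
  have hl4 : "CPT ".toList.length = 4 := rfl
  have hL4 : PySem.Str.len "CPT " = ((4 : Nat) : Int) := rfl
  have hl5 : "DR ".toList.length = 3 := rfl
  have hL5 : PySem.Str.len "DR " = ((3 : Nat) : Int) := rfl
  have hl6 : "MR ".toList.length = 3 := rfl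
  have hL6 : PySem.Str.len "MR " = ((3 : Nat) : Int) := rfl
  have hl7 : "MRS ".toList.length = 4 := rfl
  have hL7 : PySem.Str.len "MRS " = ((4 : Nat) : Int) := rfl
  have hl8 : "MS ".toList.length = 3 := rfl
  have hL8 : PySem.Str.len "MS " = ((3 : Nat) : Int) := rfl
  have hl9 : "HON ".toList.length = 4 := rfl
  have hL9 : PySem.Str.len "HON " = ((4 : Nat) : Int) := rfl
  simp only [nsnLoop, nsnAbbrevMap, nsnBy3_eq, nsnBy4_eq, PySem.Dict.get?_mk_cons,
    nsn_get?_mk_nil, h3, h4, nsn_condA, nsn_condB,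
    hl0, hL0, hl1, hL1, hl2, hL2, hl3, hL3, hl4, hL4, hl5, hL5, hl6, hL6, hl7, hL7, hl8, hL8, hl9, hL9]
  split_ifs <;>
    first
      | rfl
      | (exfalso; apply nsn_clash n.toList <;> first | assumption | decide)

-- ===== VERDICT (by name: the statement is the Claim_ definition above) =====
theorem normalize_speaker_name_spec : Claim_equal_normalize_speaker_name := by
  intro speaker _
  unfold Spec_normalize_speaker_name normalize_speaker_name normalize_speaker_name_alt
  cases hb : (speaker == "") with
  | true => simp only [hb, if_true]
  | false =>
    simp only [hb, Bool.false_eq_true, if_false]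
    exact nsn_core (PySem.Str.upper (PySem.Str.strip speaker))
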